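-- pv_equiv track=rewrite | github.com/richardzhang-git/Scrabble | main.py | findBlanks
-- ===== SOURCE A (Python) =====
-- from collections import Counter
--
-- def findBlanks(avail, used):
--     """
--     Has to be used AFTER canMakeWord()
--     Returns a list with inex, letter that contains the letter that comes from the blank
--     """
--     usedLetters = [i[2] for i in used]
--     rackCounter = Counter(avail)
--     wildcards = []
--     for index, letter in enumerate(usedLetters):
--         if rackCounter[letter] > 0:
--             rackCounter[letter] -= 1
--         else:
--             wildcards.append(used[index][:-1])
--
--     return wildcards
-- ===== SOURCE B (Python) =====
-- def findBlanks(avail, used):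
--     """
--     Has to be used AFTER canMakeWord()
--     Returns a list with inex, letter that contains the letter that comes from the blank
--     """
--     letters = [u[2] for u in used]
--     return [u[:-1] for i, u in enumerate(used)
--             if avail.count(u[2]) < letters[:i + 1].count(u[2])]
-- ===== Notes on version B (the rewrite author's own statement) =====
-- stated objective: alternative
-- what changed: Replaces A's stateful decrementing Counter loop by a stateless comprehension: an element comes from a blank iff its letter occurs more times in the used-prefix up to and including it than in avail, so B filters enumerate(used) with a pure prefix-count test and keeps no mutable state.
import Mathlib
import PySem

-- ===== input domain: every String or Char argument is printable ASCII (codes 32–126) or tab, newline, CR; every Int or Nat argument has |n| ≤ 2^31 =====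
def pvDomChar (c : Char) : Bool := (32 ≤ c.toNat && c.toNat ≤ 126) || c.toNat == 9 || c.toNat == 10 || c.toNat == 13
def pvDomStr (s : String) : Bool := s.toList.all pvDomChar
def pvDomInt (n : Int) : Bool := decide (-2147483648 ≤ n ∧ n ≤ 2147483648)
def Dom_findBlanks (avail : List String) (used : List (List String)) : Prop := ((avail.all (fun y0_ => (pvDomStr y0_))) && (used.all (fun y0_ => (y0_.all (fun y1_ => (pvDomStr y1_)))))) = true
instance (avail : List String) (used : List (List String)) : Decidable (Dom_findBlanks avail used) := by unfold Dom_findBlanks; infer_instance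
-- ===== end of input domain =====

-- B replaces A's stateful decrementing Counter loop by a stateless prefix-count filter; return values agree (no speed claim).

-- ===== PORT A =====
def findBlanks (avail : List String) (used : List (List String)) : List (List String) :=
  let usedLetters := used.map (fun i => PySem.List.pyGetD i 2 "")
  let rackCounter := PySem.Dict.counter avail
  ((PySem.List.enumerate usedLetters 0).foldl
    (fun (st : PySem.Dict String Int × List (List String)) p =>
      if st.1.getD p.2 0 > 0 then
        (st.1.modify p.2 0 (fun v => v - 1), st.2)
      else
        (st.1, st.2 ++ [PySem.List.slice (PySem.List.pyGetD used p.1 []) none (some (-1))]))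
    (rackCounter, [])).2

-- ===== PORT B =====
def findBlanks_alt (avail : List String) (used : List (List String)) : List (List String) :=
  let letters := used.map (fun u => PySem.List.pyGetD u 2 "")
  ((PySem.List.enumerate used 0).filter
    (fun p => avail.count (PySem.List.pyGetD p.2 2 "") <
        (PySem.List.slice letters none (some (p.1 + 1))).count (PySem.List.pyGetD p.2 2 ""))).map
    (fun p => PySem.List.slice p.2 none (some (-1)))

-- ===== PRECONDITION & SPEC =====
-- Pre_ excludes only inputs on which the Python A raises IndexError (an entry of `used` shorter than 3, so u[2] fails); B raises there too.
def Pre_findBlanks (avail : List String) (used : List (List String)) : Prop :=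
  ∀ u ∈ used, 3 ≤ u.length
instance (avail : List String) (used : List (List String)) : Decidable (Pre_findBlanks avail used) := by unfold Pre_findBlanks; infer_instance

def pvWitness_findBlanks : List String × List (List String) :=
  (["a", "b"], [["0", "0", "a"], ["1", "0", "c"]])

def Spec_findBlanks (avail : List String) (used : List (List String)) (out : List (List String)) : Prop := out = findBlanks_alt avail used
instance (avail : List String) (used : List (List String)) (out : List (List String)) : Decidable (Spec_findBlanks avail used out) := by unfold Spec_findBlanks; infer_instance

-- ===== CLAIM (what is proved, stated in full; the proofs are below) =====
def Claim_equal_findBlanks : Prop := ∀ (avail : List String) (used : List (List String)), Dom_findBlanks avail used → Pre_findBlanks avail used → Spec_findBlanks avail used (findBlanks avail used)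

-- ===== LEMMAS AND PROOFS =====

-- the letter an entry of `used` contributes
def pvLetter (u : List String) : String := PySem.List.pyGetD u 2 ""

-- abstract form of the wildcard selection: c is the remaining multiplicity of each letter
def pvWcs (c : String → Int) : List (List String) → List (List String)
  | [] => []
  | u :: rest =>
    if 0 < c (pvLetter u) then
      pvWcs (fun x => if x = pvLetter u then c x - 1 else c x) rest
    else
      PySem.List.slice u none (some (-1)) :: pvWcs c rest

lemma pvWcs_congr (c c' : String → Int) (us : List (List String))
    (h : ∀ l, c l = c' l ∨ (c l ≤ 0 ∧ c' l ≤ 0)) : pvWcs c us = pvWcs c' us := by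
  induction us generalizing c c' with
  | nil => rfl
  | cons u rest ih =>
    rcases h (pvLetter u) with heq | ⟨h1, h2⟩
    · simp only [pvWcs, heq]
      split
      · exact ih _ _ (fun l => by
          by_cases hl : l = pvLetter u
          · subst hl; simp [heq]
          · simpa [hl] using h l)
      · exact congrArg _ (ih _ _ h)
    · simp only [pvWcs]
      rw [if_neg (show ¬ 0 < c (pvLetter u) by omega), if_neg (show ¬ 0 < c' (pvLetter u) by omega)]
      exact congrArg _ (ih _ _ h)

lemma pvFoldA (used suf : List (List String)) (k : Int)
    (h : ∀ j : Nat, j < suf.length → PySem.List.pyGetD used (k + j) [] = suf[j]!)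
    (rc : PySem.Dict String Int) (wc : List (List String)) :
    ((PySem.List.enumerate (suf.map pvLetter) k).foldl
      (fun (st : PySem.Dict String Int × List (List String)) p =>
        if st.1.getD p.2 0 > 0 then
          (st.1.modify p.2 0 (fun v => v - 1), st.2)
        else
          (st.1, st.2 ++ [PySem.List.slice (PySem.List.pyGetD used p.1 []) none (some (-1))]))
      (rc, wc)).2 = wc ++ pvWcs (fun l => rc.getD l 0) suf := by
  induction suf generalizing k rc wc with
  | nil => simp [pvWcs]
  | cons u rest ih =>
    have hu : PySem.List.pyGetD used k [] = u := by
      have := h 0 (by simp)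
      simpa using this
    have hrest : ∀ j : Nat, j < rest.length → PySem.List.pyGetD used ((k + 1) + j) [] = rest[j]! := by
      intro j hj
      have := h (j + 1) (by simpa using Nat.succ_lt_succ hj)
      simpa [Int.add_assoc, Int.add_comm 1 (j : Int)] using this
    simp only [List.map_cons, PySem.List.enumerate_cons, List.foldl_cons]
    by_cases hc : rc.getD (pvLetter u) 0 > 0
    · simp only [if_pos hc]
      rw [ih (k + 1) hrest _ wc]
      congr 1
      rw [pvWcs, if_pos hc]
      apply pvWcs_congr
      intro l
      left
      by_cases hl : l = pvLetter u
      · subst hl; simp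
      · simp [PySem.Dict.getD_modify, hl]
    · simp only [if_neg hc]
      rw [ih (k + 1) hrest _ _]
      rw [pvWcs, if_neg hc, hu]
      simp
lemma pvFoldB (avail : List String) (letters : List String) (pre suf : List (List String))
    (hlet : letters = (pre ++ suf).map pvLetter) :
    ((PySem.List.enumerate suf (pre.length : Int)).filter
      (fun p => avail.count (PySem.List.pyGetD p.2 2 "") <
          (PySem.List.slice letters none (some (p.1 + 1))).count (PySem.List.pyGetD p.2 2 ""))).map
      (fun p => PySem.List.slice p.2 none (some (-1)))
    = pvWcs (fun l => avail.count l - (pre.map pvLetter).count l) suf := by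
  induction suf generalizing pre with
  | nil => simp [PySem.List.enumerate, pvWcs]
  | cons u rest ih =>
    have hpv : PySem.List.pyGetD u 2 "" = pvLetter u := rfl
    have hcast : ((pre.length : Int) + 1) = ((pre.length + 1 : Nat) : Int) := by push_cast; ring
    have htake : PySem.List.slice letters none (some ((pre.length : Int) + 1))
        = (pre ++ [u]).map pvLetter := by
      rw [hcast, PySem.List.slice_to_natCast, hlet]
      rw [List.map_append, show pre.length + 1 = (pre.map pvLetter).length + 1 by simp,
        List.take_length_add_append 1]
      simp
    have hlet' : letters = ((pre ++ [u]) ++ rest).map pvLetter := by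
      rw [hlet]; simp
    have hlen' : (((pre ++ [u]).length : Nat) : Int) = (pre.length : Int) + 1 := by
      simp
    have hcount : ((pre ++ [u]).map pvLetter).count (pvLetter u)
        = (pre.map pvLetter).count (pvLetter u) + 1 := by
      simp [List.count_append]
    have hcount' : ∀ l, l ≠ pvLetter u →
        ((pre ++ [u]).map pvLetter).count l = (pre.map pvLetter).count l := by
      intro l hl
      simp [List.count_append, Ne.symm hl]
    simp only [PySem.List.enumerate_cons, List.filter_cons, hpv]
    by_cases hc : (0 : Int) < avail.count (pvLetter u) - (pre.map pvLetter).count (pvLetter u)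
    · rw [if_neg (by
        simp only [decide_eq_true_eq, htake, hcount]
        omega)]
      rw [show ((pre.length : Int) + 1) = (((pre ++ [u]).length : Nat) : Int) by rw [hlen']]
      rw [ih (pre ++ [u]) hlet']
      rw [pvWcs, if_pos hc]
      apply pvWcs_congr
      intro l
      left
      by_cases hl : l = pvLetter u
      · subst hl; rw [hcount, if_pos rfl]; push_cast [Nat.cast_add]; ring_nf
      · rw [hcount' l hl, if_neg hl]
    · rw [if_pos (by
        simp only [decide_eq_true_eq, htake, hcount]
        omega)]
      rw [List.map_cons]
      rw [show ((pre.length : Int) + 1) = (((pre ++ [u]).length : Nat) : Int) by rw [hlen']]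
      rw [ih (pre ++ [u]) hlet']
      rw [pvWcs, if_neg hc]
      congr 1
      apply pvWcs_congr
      intro l
      by_cases hl : l = pvLetter u
      · subst hl
        right
        constructor
        · rw [hcount]; push_cast; push_cast at hc; omega
        · push_cast at hc; omega
      · left
        rw [hcount' l hl]

-- ===== VERDICT (by name: the statement is the Claim_ definition above) =====
theorem findBlanks_spec : Claim_equal_findBlanks := by
  intro avail used _ _
  show findBlanks avail used = findBlanks_alt avail used
  have e1 : (fun (i : List String) => PySem.List.pyGetD i 2 "") = pvLetter := rfl
  simp only [findBlanks, findBlanks_alt, e1]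
  rw [pvFoldA used used 0 (by
        intro j hj
        simp [List.getElem!_eq_getElem?_getD, List.getD]
        rfl) _ []]
  rw [show PySem.List.enumerate used 0 = PySem.List.enumerate used (([] : List (List String)).length : Int) from rfl]
  rw [pvFoldB avail _ [] used (by simp)]
  simp only [List.nil_append, List.map_nil]
  apply pvWcs_congr
  intro l
  left
  simp [PySem.Dict.getD_counter]
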